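-- pv_equiv track=rewrite | github.com/Mdwiki-TD/fix_refs | wprefs/src/WikiParse/src/ParserTemplates.py | find_sub_templates
-- ===== SOURCE A (Python) =====
-- from typing import Dict, List
--
-- def find_sub_templates(string: str) -> List[Dict[str, str]]:
--     matches: List[Dict[str, str]] = []
--     length = len(string)
--     i = 0
--     while i < length - 1:
--         if string[i : i + 2] == "{{":
--             depth = 1
--             j = i + 2
--             while j < length - 1 and depth > 0:
--                 if string[j : j + 2] == "{{":
--                     depth += 1
--                     j += 2
--                     continue
--                 if string[j : j + 2] == "}}":
--                     depth -= 1
--                     j += 2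
--                     if depth == 0:
--                         full = string[i:j]
--                         inner = full[2:-2]
--                         matches.append({"full": full, "inner": inner})
--                         break
--                     continue
--                 j += 1
--             i = j
--             continue
--         i += 1
--     return matches
-- ===== SOURCE B (Python) =====
-- def find_sub_templates(string):
--     # Recursive-descent parser: no depth counter; nesting is handled by the call
--     # stack. close(j) consumes one already-opened template body starting at j
--     # (just past its '{{') and returns the index just past its matching '}}',
--     # or None if the template never closes before the end.
--     n = len(string)
--
--     def close(j):
--         while j < n - 1:
--             pair = string[j : j + 2]
--             if pair == "{{":
--                 j = close(j + 2)  # skip the whole nested template recursively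
--                 if j is None:
--                     return None
--             elif pair == "}}":
--                 return j + 2
--             else:
--                 j += 1
--         return None
--
--     matches = []
--     i = 0
--     while i < n - 1:
--         if string[i : i + 2] == "{{":
--             end = close(i + 2)
--             if end is None:
--                 break  # unclosed template: nothing more can be matched
--             matches.append({"full": string[i:end], "inner": string[i + 2 : end - 2]})
--             i = end
--         else:
--             i += 1
--     return matches
-- ===== Notes on version B (the rewrite author's own statement) =====
-- stated objective: alternative
-- what changed: Replaces A's flat scan with an explicit integer depth counter (nested while loops counting unclosed '{{') by a recursive-descent parser: a close() helper consumes one opened template body and recurses into each nested template, and the top-level loop emits one match per closed template, with no depth variable anywhere; e.g. on 'a{{x|{{y}}}}b{{z}}c' both return the two top-level templates, on '{{a}}{{b' both return only the first, and on '}}{{x}}' both skip the stray close.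
import Mathlib
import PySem

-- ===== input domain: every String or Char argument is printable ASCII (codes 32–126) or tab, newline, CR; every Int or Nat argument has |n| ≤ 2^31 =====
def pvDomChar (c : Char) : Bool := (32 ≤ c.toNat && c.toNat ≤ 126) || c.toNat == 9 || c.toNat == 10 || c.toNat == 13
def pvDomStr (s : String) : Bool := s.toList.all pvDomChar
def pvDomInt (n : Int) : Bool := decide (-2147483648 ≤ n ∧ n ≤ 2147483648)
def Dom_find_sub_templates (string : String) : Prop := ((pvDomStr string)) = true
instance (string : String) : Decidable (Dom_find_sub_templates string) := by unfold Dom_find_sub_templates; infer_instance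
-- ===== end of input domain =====

-- B replaces A's flat scan with an explicit depth counter by a recursive-descent parser
-- (nesting handled by recursion); an alternative decomposition, not claimed faster.
-- Loops/recursion are ported with a fuel bound (always sufficient: every step advances the
-- position, so `length + 1` covers every run); the Python loop condition stays the guard.

-- ===== PORT A =====
-- string[i:i+2] for a nonnegative index i (exact: i ≥ 0, stop ≥ start)
def pvSlice2 (cs : List Char) (i : Nat) : List Char := (cs.drop i).take 2

-- the dict {"full": full, "inner": full[2:-2]} built from the full slice (full.length ≥ 4 at every use)
def pvEntryA (full : List Char) : List (String × String) :=
  [("full", String.ofList full), ("inner", String.ofList ((full.drop 2).take (full.length - 4)))]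

-- A's inner `while j < length - 1 and depth > 0` loop: returns the final j and,
-- if the template was closed (the break), the slice string[i:j]
def pvInnerA (cs : List Char) (fuel : Nat) (i j depth : Nat) : Nat × Option (List Char) :=
  match fuel with
  | 0 => (j, none)
  | fuel + 1 =>
    if j < cs.length - 1 ∧ 0 < depth then
      if pvSlice2 cs j = ['{', '{'] then
        pvInnerA cs fuel i (j + 2) (depth + 1)
      else if pvSlice2 cs j = ['}', '}'] then
        if depth - 1 = 0 then (j + 2, some ((cs.drop i).take (j + 2 - i)))
        else pvInnerA cs fuel i (j + 2) (depth - 1)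
      else
        pvInnerA cs fuel i (j + 1) depth
    else (j, none)

-- A's outer `while i < length - 1` loop, accumulating the matches list
def pvOuterA (cs : List Char) (fuel : Nat) (i : Nat) : List (List (String × String)) :=
  match fuel with
  | 0 => []
  | fuel + 1 =>
    if i < cs.length - 1 then
      if pvSlice2 cs i = ['{', '{'] then
        match pvInnerA cs cs.length i (i + 2) 1 with
        | (j, some full) => pvEntryA full :: pvOuterA cs fuel j
        | (j, none) => pvOuterA cs fuel j
      else pvOuterA cs fuel (i + 1)
    else []

def find_sub_templates (string : String) : List (List (String × String)) :=
  pvOuterA string.toList (string.toList.length + 1) 0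

-- ===== PORT B =====
-- B's `close(j)`: consume one opened template body from j; some k = index past its '}}',
-- none = unclosed (Python's None). The nested call is the recursive descent into a
-- nested template; the `j += 1` / `j = close(...)` steps of the Python while-loop are
-- the tail recursions.
def pvCloseB (cs : List Char) (fuel : Nat) (j : Nat) : Option Nat :=
  match fuel with
  | 0 => none
  | fuel + 1 =>
    if j < cs.length - 1 then
      if pvSlice2 cs j = ['{', '{'] then
        match pvCloseB cs fuel (j + 2) with
        | none => none
        | some k => pvCloseB cs fuel k
      else if pvSlice2 cs j = ['}', '}'] then some (j + 2)
      else pvCloseB cs fuel (j + 1)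
    else none

-- {"full": string[i:e], "inner": string[i+2:e-2]} (exact: 0 ≤ i ≤ e at every use)
def pvEntryB (cs : List Char) (i e : Nat) : List (String × String) :=
  [("full", String.ofList ((cs.drop i).take (e - i))),
   ("inner", String.ofList ((cs.drop (i + 2)).take (e - 2 - (i + 2))))]

-- B's top-level `while i < n - 1` loop
def pvOuterB (cs : List Char) (fuel : Nat) (i : Nat) : List (List (String × String)) :=
  match fuel with
  | 0 => []
  | fuel + 1 =>
    if i < cs.length - 1 then
      if pvSlice2 cs i = ['{', '{'] then
        match pvCloseB cs (cs.length + 1) (i + 2) with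
        | none => []   -- break: unclosed template
        | some e => pvEntryB cs i e :: pvOuterB cs fuel e
      else pvOuterB cs fuel (i + 1)
    else []

def find_sub_templates_alt (string : String) : List (List (String × String)) :=
  pvOuterB string.toList (string.toList.length + 1) 0

-- ===== PRECONDITION & SPEC =====
def Spec_find_sub_templates (string : String) (out : List (List (String × String))) : Prop := out = find_sub_templates_alt string
instance (string : String) (out : List (List (String × String))) : Decidable (Spec_find_sub_templates string out) := by unfold Spec_find_sub_templates; infer_instance

-- ===== CLAIM (what is proved, stated in full; the proofs are below) =====
def Claim_equal_find_sub_templates : Prop := ∀ (string : String), Dom_find_sub_templates string → Spec_find_sub_templates string (find_sub_templates string)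

-- ===== LEMMAS AND PROOFS =====

-- with the guard false every fuel gives the loop-exit / unclosed value
theorem pvInnerA_stop (cs : List Char) (fi i j d : Nat) (h : ¬ (j < cs.length - 1 ∧ 0 < d)) :
    pvInnerA cs fi i j d = (j, none) := by
  cases fi <;> simp [pvInnerA, h]

theorem pvOuterA_stop (cs : List Char) (fo p : Nat) (hp : ¬ p < cs.length - 1) :
    pvOuterA cs fo p = [] := by
  cases fo <;> simp [pvOuterA, hp]

theorem pvCloseB_stop (cs : List Char) (f j : Nat) (hp : ¬ j < cs.length - 1) :
    pvCloseB cs f j = none := by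
  cases f <;> simp [pvCloseB, hp]

-- a returned k lies past the opening and inside the string
theorem pvCloseB_bounds (cs : List Char) :
    ∀ (f j k : Nat), pvCloseB cs f j = some k → j + 2 ≤ k ∧ k ≤ cs.length := by
  intro f
  induction f with
  | zero => intro j k h; simp [pvCloseB] at h
  | succ f ih =>
    intro j k h
    simp only [pvCloseB] at h
    by_cases hj : j < cs.length - 1
    · rw [if_pos hj] at h
      by_cases h1 : pvSlice2 cs j = ['{', '{']
      · rw [if_pos h1] at h
        rcases hE : pvCloseB cs f (j + 2) with _ | k'
        · rw [hE] at h; exact absurd h (by simp)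
        · rw [hE] at h
          have h1b := ih (j + 2) k' hE
          have h2b := ih k' k h
          omega
      · rw [if_neg h1] at h
        by_cases h2 : pvSlice2 cs j = ['}', '}']
        · rw [if_pos h2] at h
          have : k = j + 2 := by simpa using h.symm
          omega
        · rw [if_neg h2] at h
          have := ih (j + 1) k h
          omega
    · rw [if_neg hj] at h; exact absurd h (by simp)

-- fuel irrelevance: any two sufficient fuels compute the same close
theorem pvCloseB_fuel (cs : List Char) :
    ∀ (m j f1 f2 : Nat), cs.length - j ≤ m → cs.length - j < f1 → cs.length - j < f2 →
      pvCloseB cs f1 j = pvCloseB cs f2 j := by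
  intro m
  induction m with
  | zero =>
    intro j f1 f2 hm _ _
    have hj : ¬ j < cs.length - 1 := by omega
    rw [pvCloseB_stop cs f1 j hj, pvCloseB_stop cs f2 j hj]
  | succ m ih =>
    intro j f1 f2 hm h1 h2
    by_cases hj : j < cs.length - 1
    · rcases f1 with _ | f1; · omega
      rcases f2 with _ | f2; · omega
      simp only [pvCloseB, if_pos hj]
      by_cases hb : pvSlice2 cs j = ['{', '{']
      · rw [if_pos hb, if_pos hb]
        have hnest : pvCloseB cs f1 (j + 2) = pvCloseB cs f2 (j + 2) :=
          ih (j + 2) f1 f2 (by omega) (by omega) (by omega)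
        rw [hnest]
        rcases hE : pvCloseB cs f2 (j + 2) with _ | k
        · rfl
        · have hk := pvCloseB_bounds cs f2 (j + 2) k hE
          exact ih k f1 f2 (by omega) (by omega) (by omega)
      · rw [if_neg hb, if_neg hb]
        by_cases hc : pvSlice2 cs j = ['}', '}']
        · rw [if_pos hc, if_pos hc]
        · rw [if_neg hc, if_neg hc]
          exact ih (j + 1) f1 f2 (by omega) (by omega) (by omega)
    · rw [pvCloseB_stop cs f1 j hj, pvCloseB_stop cs f2 j hj]

-- depth-d closing: close d still-open templates in a row (proof-side device)
def pvCloseD (cs : List Char) (d j : Nat) : Option Nat :=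
  match d with
  | 0 => some j
  | d + 1 =>
    match pvCloseB cs (cs.length + 1) j with
    | none => none
    | some k => pvCloseD cs d k

-- the main inner bridge: A's depth-counting loop at depth d from j computes exactly
-- the d-fold recursive close of B
theorem pvInner_bridge (cs : List Char) :
    ∀ (m j d i fi : Nat), 1 ≤ d → cs.length - j ≤ m → cs.length - j ≤ fi →
      (∀ k, pvCloseD cs d j = some k →
        pvInnerA cs fi i j d = (k, some ((cs.drop i).take (k - i)))) ∧
      (pvCloseD cs d j = none →
        (pvInnerA cs fi i j d).2 = none ∧ ¬ (pvInnerA cs fi i j d).1 < cs.length - 1) := by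
  intro m
  induction m with
  | zero =>
    intro j d i fi hd hm _
    have hj : ¬ j < cs.length - 1 := by omega
    have hstop := pvInnerA_stop cs fi i j d (by tauto)
    have hcd : pvCloseD cs d j = none := by
      rcases d with _ | d; · omega
      simp only [pvCloseD, pvCloseB_stop cs _ j hj]
    refine ⟨fun k hk => ?_, fun _ => ?_⟩
    · rw [hcd] at hk; exact absurd hk (by simp)
    · rw [hstop]; exact ⟨rfl, hj⟩
  | succ m ih =>
    intro j d i fi hd hm hfi
    by_cases hj : j < cs.length - 1
    · rcases fi with _ | fi; · omega
      have hguard : j < cs.length - 1 ∧ 0 < d := ⟨hj, by omega⟩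
      by_cases hb : pvSlice2 cs j = ['{', '{']
      · -- A: depth+1, j+2;  B: pvCloseD d j = pvCloseD (d+1) (j+2)
        have hA : pvInnerA cs (fi + 1) i j d = pvInnerA cs fi i (j + 2) (d + 1) := by
          simp only [pvInnerA, if_pos hguard, if_pos hb]
        have hCD : pvCloseD cs d j = pvCloseD cs (d + 1) (j + 2) := by
          rcases d with _ | d; · omega
          have hunf : pvCloseB cs (cs.length + 1) j
              = match pvCloseB cs cs.length (j + 2) with
                | none => none
                | some k => pvCloseB cs cs.length k := by
            simp only [pvCloseB, if_pos hj, if_pos hb]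
          have hnf : pvCloseB cs cs.length (j + 2) = pvCloseB cs (cs.length + 1) (j + 2) :=
            pvCloseB_fuel cs cs.length (j + 2) cs.length (cs.length + 1)
              (by omega) (by omega) (by omega)
          show pvCloseD cs (d + 1) j = pvCloseD cs (d + 2) (j + 2)
          simp only [pvCloseD, hunf, hnf]
          rcases hE : pvCloseB cs (cs.length + 1) (j + 2) with _ | k
          · rfl
          · have hk := pvCloseB_bounds cs (cs.length + 1) (j + 2) k hE
            have hkf : pvCloseB cs cs.length k = pvCloseB cs (cs.length + 1) k :=
              pvCloseB_fuel cs cs.length k cs.length (cs.length + 1)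
                (by omega) (by omega) (by omega)
            simp only [hkf]
        rw [hA, hCD]
        exact ih (j + 2) (d + 1) i fi (by omega) (by omega) (by omega)
      · by_cases hc : pvSlice2 cs j = ['}', '}']
        · have hCB : pvCloseB cs (cs.length + 1) j = some (j + 2) := by
            simp only [pvCloseB, if_pos hj, if_neg hb, if_pos hc]
          rcases d with _ | d; · omega
          rcases d with _ | d
          · -- d = 1: the break, template closed at j+2
            have hA : pvInnerA cs (fi + 1) i j 1
                = (j + 2, some ((cs.drop i).take (j + 2 - i))) := by
              simp only [pvInnerA, if_pos hguard, if_neg hb, if_pos hc]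
              simp
            have hCD : pvCloseD cs 1 j = some (j + 2) := by
              simp only [pvCloseD, hCB]
            refine ⟨fun k hk => ?_, fun hn => ?_⟩
            · rw [hCD] at hk
              have : k = j + 2 := by simpa using hk.symm
              rw [hA, this]
            · rw [hCD] at hn; exact absurd hn (by simp)
          · -- d ≥ 2: one close done, continue at depth d-1
            have hA : pvInnerA cs (fi + 1) i j (d + 2) = pvInnerA cs fi i (j + 2) (d + 1) := by
              simp only [pvInnerA, if_pos hguard, if_neg hb, if_pos hc]
              rw [if_neg (by omega)]
              norm_num
            have hCD : pvCloseD cs (d + 2) j = pvCloseD cs (d + 1) (j + 2) := by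
              simp only [pvCloseD, hCB]
            rw [hA, hCD]
            exact ih (j + 2) (d + 1) i fi (by omega) (by omega) (by omega)
        · -- no token at j: both advance by 1
          have hA : pvInnerA cs (fi + 1) i j d = pvInnerA cs fi i (j + 1) d := by
            simp only [pvInnerA, if_pos hguard, if_neg hb, if_neg hc]
          have hCD : pvCloseD cs d j = pvCloseD cs d (j + 1) := by
            rcases d with _ | d; · omega
            have hCB : pvCloseB cs (cs.length + 1) j = pvCloseB cs cs.length (j + 1) := by
              simp only [pvCloseB, if_pos hj, if_neg hb, if_neg hc]
            have hnf : pvCloseB cs cs.length (j + 1) = pvCloseB cs (cs.length + 1) (j + 1) :=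
              pvCloseB_fuel cs cs.length (j + 1) cs.length (cs.length + 1)
                (by omega) (by omega) (by omega)
            simp only [pvCloseD, hCB, hnf]
          rw [hA, hCD]
          exact ih (j + 1) d i fi hd (by omega) (by omega)
    · have hstop := pvInnerA_stop cs (fi) i j d (by tauto)
      have hcd : pvCloseD cs d j = none := by
        rcases d with _ | d; · omega
        simp only [pvCloseD, pvCloseB_stop cs _ j hj]
      refine ⟨fun k hk => ?_, fun _ => ?_⟩
      · rw [hcd] at hk; exact absurd hk (by simp)
      · rw [hstop]; exact ⟨rfl, hj⟩

-- the two entry builders agree on a closed template slice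
theorem pvEntry_eq (cs : List Char) (i e : Nat) (hie : i + 4 ≤ e) (he : e ≤ cs.length) :
    pvEntryA ((cs.drop i).take (e - i)) = pvEntryB cs i e := by
  unfold pvEntryA pvEntryB
  have hlen : ((cs.drop i).take (e - i)).length = e - i := by
    rw [List.length_take, List.length_drop]; omega
  have hdrop : ((cs.drop i).take (e - i)).drop 2 = (cs.drop (i + 2)).take (e - i - 2) := by
    rw [List.drop_take, List.drop_drop]
  rw [hlen, hdrop, List.take_take]
  have hmin : min (e - i - 4) (e - i - 2) = e - 2 - (i + 2) := by omega
  rw [hmin]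

-- the outer loops agree
theorem pvOuter_bridge (cs : List Char) :
    ∀ (m i fo fb : Nat), cs.length - i ≤ m → cs.length - i ≤ fo → cs.length - i ≤ fb →
      pvOuterA cs fo i = pvOuterB cs fb i := by
  intro m
  induction m with
  | zero =>
    intro i fo fb hm _ _
    have hi : ¬ i < cs.length - 1 := by omega
    rw [pvOuterA_stop cs fo i hi]
    cases fb <;> simp [pvOuterB, hi]
  | succ m ih =>
    intro i fo fb hm hfo hfb
    by_cases hi : i < cs.length - 1
    · rcases fo with _ | fo; · omega
      rcases fb with _ | fb; · omega
      by_cases hb : pvSlice2 cs i = ['{', '{']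
      · simp only [pvOuterA, pvOuterB, if_pos hi, if_pos hb]
        have hbr := pvInner_bridge cs cs.length (i + 2) 1 i cs.length
          (by omega) (by omega) (by omega)
        rcases hE : pvCloseB cs (cs.length + 1) (i + 2) with _ | e
        · -- unclosed: A's inner stops past the end, A's outer then yields []
          have hcd : pvCloseD cs 1 (i + 2) = none := by simp [pvCloseD, hE]
          have ⟨h2, h1⟩ := hbr.2 hcd
          rcases hI : pvInnerA cs cs.length i (i + 2) 1 with ⟨j, r⟩
          rw [hI] at h1 h2
          simp only at h1 h2
          subst h2
          simp only
          exact pvOuterA_stop cs fo j h1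
        · have hcd : pvCloseD cs 1 (i + 2) = some e := by simp [pvCloseD, hE]
          rw [hbr.1 e hcd]
          have hbe := pvCloseB_bounds cs (cs.length + 1) (i + 2) e hE
          simp only
          rw [pvEntry_eq cs i e (by omega) (by omega)]
          rw [ih e fo fb (by omega) (by omega) (by omega)]
      · simp only [pvOuterA, pvOuterB, if_pos hi, if_neg hb]
        exact ih (i + 1) fo fb (by omega) (by omega) (by omega)
    · rw [pvOuterA_stop cs fo i hi]
      cases fb <;> simp [pvOuterB, hi]

-- ===== VERDICT (by name: the statement is the Claim_ definition above) =====
theorem find_sub_templates_spec : Claim_equal_find_sub_templates := by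
  intro s _
  unfold Spec_find_sub_templates find_sub_templates find_sub_templates_alt
  exact pvOuter_bridge s.toList s.toList.length 0 (s.toList.length + 1) (s.toList.length + 1)
    (by omega) (by omega) (by omega)
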